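-- pv_equiv track=rewrite | github.com/voron521/Python_algorithms_and_data_structures | lesson_4/less_4_task_1.py | version_2
-- ===== SOURCE A (Python) =====
-- def version_2(matrix):
--     matrix_2 = [[] for _ in range(len(matrix[0]))]
--
--     min_max = 0
--
--     for i in range(0, len(matrix[0])):
--
--         for j in range(0, len(matrix)):
--             matrix_2[i].append(matrix[j][i])
--
--     for i in matrix_2:
--         if min(i) > min_max:
--             min_max = min(i)
--
--     return (min_max)
-- ===== SOURCE B (Python) =====
-- def version_2(matrix):
--     # Stream the rows with a running per-column minimum vector instead of
--     # building the whole transpose first.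
--     mins = list(matrix[0])
--     for row in matrix[1:]:
--         mins = [min(m, row[j]) for j, m in enumerate(mins)]
--     best = 0
--     for m in mins:
--         if m > best:
--             best = m
--     return best
-- ===== Notes on version B (the rewrite author's own statement) =====
-- stated objective: alternative
-- what changed: B drops the transpose table: it streams the rows once while maintaining a running per-column minimum vector, then takes the max with the same 0 floor.
import Mathlib
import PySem

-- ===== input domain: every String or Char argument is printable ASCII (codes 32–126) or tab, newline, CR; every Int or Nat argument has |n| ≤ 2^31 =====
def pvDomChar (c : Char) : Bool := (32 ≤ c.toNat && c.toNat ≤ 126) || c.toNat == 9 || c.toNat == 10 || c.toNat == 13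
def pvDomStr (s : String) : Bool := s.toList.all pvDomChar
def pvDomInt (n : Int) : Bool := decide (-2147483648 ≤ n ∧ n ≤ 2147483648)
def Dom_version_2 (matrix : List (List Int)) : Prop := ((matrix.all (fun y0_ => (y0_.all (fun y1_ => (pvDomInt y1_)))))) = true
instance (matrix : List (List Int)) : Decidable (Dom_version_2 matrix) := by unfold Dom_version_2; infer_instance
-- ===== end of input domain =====

-- B streams the rows with a running per-column minimum vector instead of building the transpose.
-- Equivalence is about return values; neither program mutates its argument.

-- ===== PORT A =====
-- matrix[j][i] is ported as pyGetD … 0; under Pre_version_2 every such index is in range,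
-- so the default is never consulted (outside Pre_ the Python raises IndexError).
def version_2 (matrix : List (List Int)) : Int :=
  let n : Int := ((PySem.List.pyGetD matrix 0 ([] : List Int)).length : Int)
  let matrix_2 : List (List Int) :=
    (PySem.List.pyRange 0 n 1).map (fun i =>
      (PySem.List.pyRange 0 (matrix.length : Int) 1).map (fun j =>
        PySem.List.pyGetD (PySem.List.pyGetD matrix j ([] : List Int)) i 0))
  matrix_2.foldl (fun min_max col =>
    match PySem.List.min? col (fun y => y) with
    | some m => if m > min_max then m else min_max
    | none => min_max) 0

-- ===== PORT B =====
def version_2_alt (matrix : List (List Int)) : Int :=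
  let mins0 := PySem.List.pyGetD matrix 0 ([] : List Int)
  let mins := (PySem.List.slice matrix (some 1) none).foldl
    (fun mins row =>
      (PySem.List.enumerate mins 0).map (fun jm => min jm.2 (PySem.List.pyGetD row jm.1 0)))
    mins0
  mins.foldl (fun best m => if m > best then m else best) 0

-- ===== PRECONDITION & SPEC =====
-- Pre_ excludes exactly the inputs on which the Python A raises IndexError:
-- an empty matrix (matrix[0]) and rows shorter than the first row (matrix[j][i]).
def Pre_version_2 (matrix : List (List Int)) : Prop :=
  matrix ≠ [] ∧ ∀ row ∈ matrix, (matrix.headD []).length ≤ row.length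
instance (matrix : List (List Int)) : Decidable (Pre_version_2 matrix) := by
  unfold Pre_version_2; infer_instance
def pvWitness_version_2 : List (List Int) := [[1, 2], [3, 4]]

def Spec_version_2 (matrix : List (List Int)) (out : Int) : Prop := out = version_2_alt matrix
instance (matrix : List (List Int)) (out : Int) : Decidable (Spec_version_2 matrix out) := by
  unfold Spec_version_2; infer_instance

-- ===== CLAIM (what is proved, stated in full; the proofs are below) =====
def Claim_equal_version_2 : Prop :=
  ∀ (matrix : List (List Int)), Dom_version_2 matrix → Pre_version_2 matrix →
    Spec_version_2 matrix (version_2 matrix)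

-- ===== LEMMAS AND PROOFS =====

-- inner column loop of A = mapping over the rows
theorem pv_col_eq (matrix : List (List Int)) (i : Int) :
    (PySem.List.pyRange 0 (matrix.length : Int) 1).map (fun j =>
        PySem.List.pyGetD (PySem.List.pyGetD matrix j ([] : List Int)) i 0)
      = matrix.map (fun row => PySem.List.pyGetD row i 0) := by
  have h := PySem.List.map_pyGetD_pyRange_zero' (xs := matrix) (d := ([] : List Int))
  calc (PySem.List.pyRange 0 (matrix.length : Int) 1).map (fun j =>
          PySem.List.pyGetD (PySem.List.pyGetD matrix j ([] : List Int)) i 0)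
      = ((PySem.List.pyRange 0 (matrix.length : Int) 1).map
          (fun j => PySem.List.pyGetD matrix j ([] : List Int))).map
          (fun row => PySem.List.pyGetD row i 0) := by
        rw [List.map_map]; rfl
    _ = matrix.map (fun row => PySem.List.pyGetD row i 0) := by rw [h]

-- B's fold maintains mins[j] = running min of column j
theorem pv_fold_mins (rest : List (List Int)) (acc : List Int) :
    rest.foldl (fun mins row =>
        (PySem.List.enumerate mins 0).map (fun jm => min jm.2 (PySem.List.pyGetD row jm.1 0)))
      acc
    = (List.range acc.length).map (fun (j : Nat) =>
        rest.foldl (fun a row => min a (PySem.List.pyGetD row (Int.ofNat j) 0)) (acc.getD j 0)) := by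
  induction rest generalizing acc with
  | nil =>
      simp only [List.foldl_nil]
      apply List.ext_getElem
      · simp
      · intro k h1 h2
        simp [List.getD_eq_getElem?_getD, List.getElem?_eq_getElem (by simpa using h1)]
  | cons row rest ih =>
      simp only [List.foldl_cons]
      rw [ih]
      apply List.ext_getElem
      · simp [PySem.List.length_enumerate]
      · intro k h1 h2
        have hk : k < acc.length := by
          simpa [PySem.List.length_enumerate] using h1
        simp [List.getD_eq_getElem?_getD, List.getElem?_eq_getElem hk]

-- ===== VERDICT (by name: the statement is the Claim_ definition above) =====
theorem version_2_spec : Claim_equal_version_2 := by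
  intro matrix _hdom _hpre
  unfold Spec_version_2 version_2 version_2_alt
  cases matrix with
  | nil => decide
  | cons r0 rest =>
      simp only [PySem.List.slice_from_one, List.tail_cons, PySem.List.pyGetD_zero_cons,
        pv_col_eq]
      rw [pv_fold_mins]
      have hrange : PySem.List.pyRange 0 (r0.length : Int) 1
          = (List.range r0.length).map (fun k : Nat => Int.ofNat k) := by
        simp [PySem.List.pyRange_one, Int.ofNat_eq_natCast]
      rw [hrange, List.map_map, List.foldl_map, List.foldl_map]
      refine congrFun (congrFun (congrArg List.foldl ?_) 0) (List.range r0.length)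
      funext b k
      simp [PySem.List.min?_id_cons, List.foldl_map, Int.ofNat_eq_natCast]
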